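-- pv_equiv track=rewrite | github.com/mpi-sws-rse/ltltalk-interactive-synthesis | encoding/utils/Traces.py | _flieLiteralsStringToVector
-- ===== SOURCE A (Python) =====
-- def _flieLiteralsStringToVector(v, literals):
--     vec = []
--     true_literals = v.split(',')
--     for l in literals:
--         if l in true_literals:
--             vec.append(1)
--         else:
--             vec.append(0)
--     return vec
-- ===== SOURCE B (Python) =====
-- def _flieLiteralsStringToVector(v, literals):
--     index = {}
--     for i, l in enumerate(literals):
--         index.setdefault(l, []).append(i)
--     vec = [0] * len(literals)
--     for tok in v.split(','):
--         for i in index.get(tok, []):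
--             vec[i] = 1
--     return vec
-- ===== Notes on version B (the rewrite author's own statement) =====
-- stated objective: alternative
-- what changed: Instead of testing each literal for membership in the token list (a linear scan per literal), B builds a literal-to-positions index dict once, then walks the split tokens and scatters 1s into a preallocated zero vector at the recorded positions.
import Mathlib
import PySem

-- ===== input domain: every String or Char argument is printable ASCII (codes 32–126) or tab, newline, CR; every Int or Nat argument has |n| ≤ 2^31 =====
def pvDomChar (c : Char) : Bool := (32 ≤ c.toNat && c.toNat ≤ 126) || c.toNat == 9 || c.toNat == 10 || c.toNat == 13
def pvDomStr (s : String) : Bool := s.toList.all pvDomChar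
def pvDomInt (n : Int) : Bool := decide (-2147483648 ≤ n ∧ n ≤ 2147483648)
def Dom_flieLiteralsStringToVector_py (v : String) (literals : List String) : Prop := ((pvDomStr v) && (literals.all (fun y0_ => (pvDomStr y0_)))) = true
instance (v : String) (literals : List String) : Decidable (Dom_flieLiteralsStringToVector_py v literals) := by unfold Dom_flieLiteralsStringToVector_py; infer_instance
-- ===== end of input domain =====

-- B replaces the per-literal membership scan with a prebuilt literal→positions index that the
-- comma-separated tokens scatter into (objective: alternative decomposition, inverted traversal).

-- ===== PORT A =====
-- vec = []; true_literals = v.split(','); for l in literals: vec.append(1 if l in true_literals else 0)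
def flieLiteralsStringToVector_py (v : String) (literals : List String) : List Int :=
  let true_literals := (PySem.Str.split? v ",").getD []
  literals.foldl (fun vec l => vec ++ [if true_literals.contains l then (1 : Int) else 0]) []

-- ===== PORT B =====
-- index = {}; for i, l in enumerate(literals): index.setdefault(l, []).append(i)
-- (setdefault-then-append == insert l (getD l [] ++ [i]): overwrite keeps the key's position)
-- vec = [0]*len(literals); for tok in v.split(','): for i in index.get(tok, []): vec[i] = 1
def flieLiteralsStringToVector_py_alt (v : String) (literals : List String) : List Int :=
  let index : PySem.Dict String (List Int) :=
    (PySem.List.enumerate literals).foldl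
      (fun d p => d.insert p.2 (d.getD p.2 [] ++ [p.1])) PySem.Dict.empty
  let vec := List.replicate literals.length (0 : Int)
  ((PySem.Str.split? v ",").getD []).foldl
    (fun vec tok => (index.getD tok []).foldl (fun vec i => PySem.List.pySetD vec i 1) vec) vec

-- ===== PRECONDITION & SPEC =====
def Spec_flieLiteralsStringToVector_py (v : String) (literals : List String) (out : List Int) : Prop := out = flieLiteralsStringToVector_py_alt v literals
instance (v : String) (literals : List String) (out : List Int) : Decidable (Spec_flieLiteralsStringToVector_py v literals out) := by unfold Spec_flieLiteralsStringToVector_py; infer_instance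

-- ===== CLAIM (what is proved, stated in full; the proofs are below) =====
def Claim_equal_flieLiteralsStringToVector_py : Prop := ∀ (v : String) (literals : List String), Dom_flieLiteralsStringToVector_py v literals → Spec_flieLiteralsStringToVector_py v literals (flieLiteralsStringToVector_py v literals)

-- ===== LEMMAS AND PROOFS =====

-- positions (starting at offset s) at which k occurs in l
def posList (k : String) (l : List String) (s : Int) : List Int :=
  (PySem.List.enumerate l s).filterMap (fun p => if p.2 = k then some p.1 else none)

theorem posList_nil (k : String) (s : Int) : posList k [] s = [] := rfl

theorem posList_cons (k x : String) (xs : List String) (s : Int) :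
    posList k (x :: xs) s = (if x = k then [s] else []) ++ posList k xs (s + 1) := by
  simp only [posList, PySem.List.enumerate_cons, List.filterMap_cons]
  split_ifs <;> simp

theorem mem_posList (l : List String) (k : String) (s i : Int) :
    i ∈ posList k l s ↔ ∃ m : Nat, i = s + m ∧ l[m]? = some k := by
  induction l generalizing s with
  | nil => simp [posList_nil]
  | cons x xs ih =>
    rw [posList_cons]
    simp only [List.mem_append, ih]
    constructor
    · rintro (h | ⟨m, rfl, hm⟩)
      · split_ifs at h with hx
        · simp at h
          exact ⟨0, by omega, by simp [hx]⟩
        · simp at h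
      · exact ⟨m + 1, by push_cast; omega, by simpa using hm⟩
    · rintro ⟨m, rfl, hm⟩
      cases m with
      | zero =>
        left
        simp at hm
        simp [hm]
      | succ m =>
        right
        exact ⟨m, by push_cast; omega, by simpa using hm⟩

theorem idx_getD (l : List String) (s : Int) (d : PySem.Dict String (List Int)) (k : String) :
    ((PySem.List.enumerate l s).foldl (fun d p => d.insert p.2 (d.getD p.2 [] ++ [p.1])) d).getD k []
      = d.getD k [] ++ posList k l s := by
  induction l generalizing s d with
  | nil => simp [posList_nil, PySem.List.enumerate]
  | cons x xs ih =>
    rw [PySem.List.enumerate_cons, List.foldl_cons, ih, posList_cons]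
    by_cases hx : x = k
    · subst hx
      simp
    · simp [PySem.Dict.getD_insert, hx, Ne.symm hx]

theorem scatter_getElem? (I : List Int) (vec : List Int) (j : Nat)
    (hI : ∀ i ∈ I, 0 ≤ i) :
    (I.foldl (fun v i => PySem.List.pySetD v i 1) vec)[j]?
      = if (j : Int) ∈ I ∧ j < vec.length then some 1 else vec[j]? := by
  induction I generalizing vec with
  | nil => simp
  | cons i I ih =>
    have hi : 0 ≤ i := hI i (by simp)
    rw [List.foldl_cons, ih _ (fun x hx => hI x (by simp [hx])),
        PySem.List.pySetD_of_nonneg _ _ hi]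
    by_cases hmem : (j : Int) ∈ I ∧ j < vec.length
    · rw [if_pos ⟨hmem.1, by simpa using hmem.2⟩,
          if_pos ⟨List.mem_cons_of_mem _ hmem.1, hmem.2⟩]
    · have hlen' : (vec.set i.toNat 1).length = vec.length := by simp
      rw [hlen', if_neg hmem]
      by_cases hj : (j : Int) = i ∧ j < vec.length
      · have hji : i.toNat = j := by omega
        rw [if_pos ⟨by simp [hj.1], hj.2⟩]
        simp [hji, hj.2]
      · have hne : ¬((j : Int) ∈ i :: I ∧ j < vec.length) := by
          simp only [List.mem_cons]
          rintro ⟨h1 | h1, h2⟩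
          · exact hj ⟨h1, h2⟩
          · exact hmem ⟨h1, h2⟩
        rw [if_neg hne]
        rcases Nat.lt_or_ge j vec.length with h2 | h2
        · have hij : i.toNat ≠ j := by
            intro h; exact hj ⟨by omega, h2⟩
          simp [hij]
        · rw [List.getElem?_eq_none (by simpa using h2),
              List.getElem?_eq_none (by simpa using h2)]

theorem ports_agree (v : String) (literals : List String) :
    flieLiteralsStringToVector_py v literals = flieLiteralsStringToVector_py_alt v literals := by
  unfold flieLiteralsStringToVector_py flieLiteralsStringToVector_py_alt
  set tokens := (PySem.Str.split? v ",").getD [] with htoks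
  rw [PySem.List.foldl_append_singleton_eq_map, List.nil_append]
  have hidx : ∀ k : String,
      (((PySem.List.enumerate literals).foldl
        (fun d p => d.insert p.2 (d.getD p.2 [] ++ [p.1])) (PySem.Dict.empty)).getD k [])
        = posList k literals 0 := by
    intro k
    rw [show PySem.List.enumerate literals = PySem.List.enumerate literals 0 from rfl, idx_getD]
    simp [PySem.Dict.getD, PySem.Dict.empty, PySem.Dict.get?]
  simp only [hidx]
  rw [← List.foldl_flatMap]
  apply List.ext_getElem?
  intro j
  rw [scatter_getElem?]
  · by_cases hlen : j < literals.length
    · have hlj : literals[j]? = some literals[j] := List.getElem?_eq_getElem hlen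
      have hmem : ((j : Int) ∈ tokens.flatMap fun tok => posList tok literals 0)
          ↔ literals[j] ∈ tokens := by
        simp only [List.mem_flatMap, mem_posList]
        constructor
        · rintro ⟨tok, htok, m, hm, hml⟩
          have hmj : m = j := by omega
          subst hmj
          rw [hlj] at hml
          cases hml
          exact htok
        · intro h
          exact ⟨literals[j], h, j, by omega, hlj⟩
      by_cases hc : literals[j] ∈ tokens
      · rw [if_pos ⟨hmem.mpr hc, by simpa using hlen⟩]
        simp [hlj, hc]
      · rw [if_neg (fun h => hc (hmem.mp h.1))]
        simp [hc, hlen]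
    · rw [if_neg (fun h => hlen (by simpa using h.2))]
      rw [List.getElem?_eq_none (by simp; omega), List.getElem?_eq_none (by simp; omega)]
  · intro i hi
    simp only [List.mem_flatMap, mem_posList] at hi
    obtain ⟨tok, _, m, rfl, _⟩ := hi
    omega

-- ===== VERDICT (by name: the statement is the Claim_ definition above) =====
theorem flieLiteralsStringToVector_py_spec : Claim_equal_flieLiteralsStringToVector_py := by
  intro v literals _
  exact ports_agree v literals
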